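-- pv_equiv track=rewrite | github.com/tOrryV/Cryptoanalysis_lab_2 | ciphers/affine_bigram.py | affine_bigram_decrypt
-- ===== SOURCE A (Python) =====
-- def affine_bigram_decrypt(_alphabet, _text, a, b, crossing=False):
--     """
--     Affine bigram cipher decryption without precomputing all bigrams.
--
--     Mapping:
--       For an alphabet of size m, bigram (y1, y2) -> Y = y1*m + y2.
--       Decryption: X = a_inv * (Y - b) mod m^2, where a_inv = a^{-1} mod m^2.
--       Decoding back to chars: x1, x2 = divmod(X, m).
--
--     :param _alphabet: Alphabet as a string; each character must be unique.
--     :param _text: Ciphertext composed only of characters from _alphabet.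
--     :param a: Multiplicative key; must be coprime with m^2 (gcd(a, m^2) == 1).
--     :param b: Additive key, interpreted modulo m^2.
--     :param crossing: Set True if the encryption used overlapping bigrams; otherwise False.
--     :return: Decrypted text string (note: for non-overlapping mode and even-length input,
--              output length equals input length; for crossing, output has length len(text)).
--     """
--     m = len(_alphabet)
--     nmod = m * m
--
--     if euclidean_algorithm_extended(a, nmod)[0] != 1:
--         raise ValueError(f"'a'={a} must be coprime with m^2={nmod}")
--
--     a_inv = euclidean_algorithm_extended(a, nmod)[1] % nmod
--     idx = {ch: i for i, ch in enumerate(_alphabet)}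
--
--     if not crossing:
--         if len(_text) % 2 != 0:
--             raise ValueError("Ciphertext length must be even in non-overlapping mode")
--         it = ((i, i + 1) for i in range(0, len(_text), 2))
--     else:
--         if len(_text) < 2:
--             return ""
--         it = ((i, i + 1) for i in range(0, len(_text) - 1))
--
--     res = []
--     for i, j in it:
--         c1, c2 = _text[i], _text[j]
--         try:
--             y1, y2 = idx[c1], idx[c2]
--         except KeyError as e:
--             raise ValueError(f"Character {e.args[0]!r} not in alphabet") from None
--
--         Y = y1 * m + y2
--         X = (a_inv * ((Y - b) % nmod)) % nmod
--         x1, x2 = divmod(X, m)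
--         res.append(_alphabet[x1] + _alphabet[x2])
--
--     return "".join(res)
--
-- def euclidean_algorithm_extended(a, b):
--     """
--     Extended Euclidean Algorithm.
--     Returns a tuple (gcd, x, y) such that: a*x + b*y = gcd(a, b)
--     :param a: First integer
--     :param b: Second integer (modulus in our use case)
--     :return: (gcd, x, y)
--     """
--
--     if a == 0:
--         return b, 0, 1
--     else:
--         gcd, x, y = euclidean_algorithm_extended(b % a, a)
--         return gcd, y - (b // a) * x, x
-- ===== SOURCE B (Python) =====
-- def euclidean_algorithm_extended(a, b):
--     """Extended Euclidean Algorithm: returns (gcd, x, y) with a*x + b*y = gcd."""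
--     if a == 0:
--         return b, 0, 1
--     gcd, x, y = euclidean_algorithm_extended(b % a, a)
--     return gcd, y - (b // a) * x, x
--
--
-- def affine_bigram_decrypt(_alphabet, _text, a, b, crossing=False):
--     """Affine bigram decryption via a precomputed table: decode each possible
--     bigram value once, then the text pass is a pure table lookup."""
--     m = len(_alphabet)
--     nmod = m * m
--
--     g = euclidean_algorithm_extended(a, nmod)
--     if g[0] != 1:
--         raise ValueError(f"'a'={a} must be coprime with m^2={nmod}")
--     a_inv = g[1] % nmod
--
--     # table[Y] = plaintext bigram for ciphertext bigram value Y, for every Y < m*m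
--     table = []
--     for Y in range(nmod):
--         X = (a_inv * ((Y - b) % nmod)) % nmod
--         x1, x2 = divmod(X, m)
--         table.append(_alphabet[x1] + _alphabet[x2])
--
--     idx = {ch: i for i, ch in enumerate(_alphabet)}
--
--     if not crossing:
--         if len(_text) % 2 != 0:
--             raise ValueError("Ciphertext length must be even in non-overlapping mode")
--         pairs = zip(_text[::2], _text[1::2])
--     else:
--         if len(_text) < 2:
--             return ""
--         pairs = zip(_text, _text[1:])
--
--     out = []
--     for c1, c2 in pairs:
--         try:
--             out.append(table[idx[c1] * m + idx[c2]])
--         except KeyError as e: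
--             raise ValueError(f"Character {e.args[0]!r} not in alphabet") from None
--     return "".join(out)
-- ===== Notes on version B (the rewrite author's own statement) =====
-- stated objective: alternative
-- what changed: B precomputes a full decryption table indexed by the bigram value (all m*m bigrams decoded once), so the pass over the text becomes a pure table lookup over zipped slices instead of per-bigram modular arithmetic on index pairs.
import Mathlib
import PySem

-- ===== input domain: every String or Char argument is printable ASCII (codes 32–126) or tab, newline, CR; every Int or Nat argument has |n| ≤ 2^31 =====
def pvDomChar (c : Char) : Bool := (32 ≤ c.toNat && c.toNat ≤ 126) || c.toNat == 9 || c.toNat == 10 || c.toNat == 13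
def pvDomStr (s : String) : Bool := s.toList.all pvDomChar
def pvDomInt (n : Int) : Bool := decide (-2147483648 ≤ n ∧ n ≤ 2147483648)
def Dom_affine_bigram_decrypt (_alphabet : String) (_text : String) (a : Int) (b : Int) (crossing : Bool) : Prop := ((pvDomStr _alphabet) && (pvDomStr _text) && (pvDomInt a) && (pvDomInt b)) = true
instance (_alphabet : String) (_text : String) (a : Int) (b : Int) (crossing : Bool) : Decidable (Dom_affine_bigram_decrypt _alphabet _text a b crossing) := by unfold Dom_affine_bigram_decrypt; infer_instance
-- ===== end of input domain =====

-- B replaces A's per-bigram modular arithmetic by a decryption table precomputed for every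
-- bigram value, the text pass becoming a lookup over zipped slices (objective: alternative).

-- shared helper: euclidean_algorithm_extended, identical in Source A and Source B
theorem pyMod_natAbs_lt (b a : Int) (h : ¬ a = 0) : (PySem.Int.mod b a).natAbs < a.natAbs := by
  rcases lt_trichotomy a 0 with hlt | heq | hgt
  · have := PySem.Int.mod_neg_bounds (a := b) hlt
    omega
  · exact absurd heq h
  · have h1 := PySem.Int.mod_nonneg (a := b) hgt
    have h2 := PySem.Int.mod_lt (a := b) hgt
    omega

def pyEuclid (a b : Int) : Int × Int × Int :=
  if h : a = 0 then (b, 0, 1)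
  else
    let r := pyEuclid (PySem.Int.mod b a) a
    (r.1, r.2.2 - PySem.Int.floordiv b a * r.2.1, r.2.1)
termination_by a.natAbs
decreasing_by exact pyMod_natAbs_lt b a h

-- shared helper: idx = {ch: i for i, ch in enumerate(_alphabet)}, identical in Source A and Source B
def mkIdx (al : List Char) : PySem.Dict Char Int :=
  (PySem.List.enumerate al).foldl (fun d p => d.insert p.2 p.1) PySem.Dict.empty

-- ===== PORT A =====
-- one iteration of A's loop: fetch _text[i], _text[i+1], look the chars up, do the modular arithmetic
def decodeA (al : List Char) (m nmod a_inv b : Int) (d : PySem.Dict Char Int) (t : List Char) (i : Int) : Option String :=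
  match PySem.List.pyGet? t i, PySem.List.pyGet? t (i + 1) with
  | some c1, some c2 =>
    match d.get? c1, d.get? c2 with
    | some y1, some y2 =>
      let X := PySem.Int.mod (a_inv * PySem.Int.mod (y1 * m + y2 - b) nmod) nmod
      match PySem.List.pyGet? al (PySem.Int.floordiv X m), PySem.List.pyGet? al (PySem.Int.mod X m) with
      | some x1, some x2 => some (String.ofList [x1, x2])
      | _, _ => none
    | _, _ => none          -- KeyError → ValueError
  | _, _ => none

def loopA (al : List Char) (m nmod a_inv b : Int) (d : PySem.Dict Char Int) (t : List Char) : List Int → Option (List String)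
  | [] => some []
  | i :: rest =>
    match decodeA al m nmod a_inv b d t i with
    | some s => (loopA al m nmod a_inv b d t rest).map (s :: ·)
    | none => none

def affine_bigram_decrypt (_alphabet : String) (_text : String) (a : Int) (b : Int) (crossing : Bool) : String :=
  let al := _alphabet.toList
  let m : Int := al.length
  let nmod := m * m
  if (pyEuclid a nmod).1 ≠ 1 then ""   -- ValueError: 'a' must be coprime with m^2
  else
    let a_inv := PySem.Int.mod (pyEuclid a nmod).2.1 nmod
    let d := mkIdx al
    let t := _text.toList
    let res : Option (List String) :=
      if crossing = false then
        if PySem.Int.mod (t.length : Int) 2 ≠ 0 then none   -- ValueError: odd length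
        else loopA al m nmod a_inv b d t (PySem.List.pyRange 0 (t.length : Int) 2)
      else if t.length < 2 then some []
      else loopA al m nmod a_inv b d t (PySem.List.pyRange 0 ((t.length : Int) - 1) 1)
    match res with
    | some parts => PySem.Str.join "" parts
    | none => ""   -- an exception was raised inside the loop

-- ===== PORT B =====
-- table[Y] = plaintext bigram for ciphertext bigram value Y  (the index branch "" is unreachable: 0 ≤ X < m*m)
def mkTable (al : List Char) (m nmod a_inv b : Int) : List String :=
  (PySem.List.pyRange 0 nmod 1).map (fun Y =>
    let X := PySem.Int.mod (a_inv * PySem.Int.mod (Y - b) nmod) nmod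
    match PySem.List.pyGet? al (PySem.Int.floordiv X m), PySem.List.pyGet? al (PySem.Int.mod X m) with
    | some x1, some x2 => String.ofList [x1, x2]
    | _, _ => "")

def lookupB (tbl : List String) (m : Int) (d : PySem.Dict Char Int) (p : Char × Char) : Option String :=
  match d.get? p.1, d.get? p.2 with
  | some y1, some y2 => PySem.List.pyGet? tbl (y1 * m + y2)
  | _, _ => none          -- KeyError → ValueError

def loopB (tbl : List String) (m : Int) (d : PySem.Dict Char Int) : List (Char × Char) → Option (List String)
  | [] => some []
  | p :: rest =>
    match lookupB tbl m d p with
    | some s => (loopB tbl m d rest).map (s :: ·)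
    | none => none

def affine_bigram_decrypt_alt (_alphabet : String) (_text : String) (a : Int) (b : Int) (crossing : Bool) : String :=
  let al := _alphabet.toList
  let m : Int := al.length
  let nmod := m * m
  let g := pyEuclid a nmod
  if g.1 ≠ 1 then ""   -- ValueError: 'a' must be coprime with m^2
  else
    let a_inv := PySem.Int.mod g.2.1 nmod
    let tbl := mkTable al m nmod a_inv b
    let d := mkIdx al
    let t := _text.toList
    let res : Option (List String) :=
      if crossing = false then
        if PySem.Int.mod (t.length : Int) 2 ≠ 0 then none   -- ValueError: odd length
        else loopB tbl m d (((PySem.List.slice? t none none 2).getD []).zip ((PySem.List.slice? t (some 1) none 2).getD []))   -- zip(_text[::2], _text[1::2]); step 2 ≠ 0 so slice? is some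
      else if t.length < 2 then some []
      else loopB tbl m d (t.zip (PySem.List.slice t (some 1) none))   -- zip(_text, _text[1:])
    match res with
    | some parts => PySem.Str.join "" parts
    | none => ""   -- an exception was raised inside the loop

-- ===== PRECONDITION & SPEC =====
-- Pre_ = exactly the inputs on which the Python A returns normally: a nonempty alphabet, a
-- nonnegative 'a' with gcd(a, m^2) = 1 (for a < 0 A's recursive gcd comes out negative, so the
-- coprimality test raises ValueError; for an empty alphabet A hits a ZeroDivisionError), an
-- even-length text in non-crossing mode (else ValueError), and every text character drawn from
-- the alphabet (else ValueError) — except that in crossing mode a text shorter than 2 returns ""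
-- before any character is looked up.
def Pre_affine_bigram_decrypt (_alphabet : String) (_text : String) (a : Int) (b : Int) (crossing : Bool) : Prop :=
  1 ≤ _alphabet.toList.length ∧ 0 ≤ a ∧
  Int.gcd a ((_alphabet.toList.length : Int) * (_alphabet.toList.length : Int)) = 1 ∧
  (crossing = false → _text.toList.length % 2 = 0) ∧
  ((crossing = true ∧ _text.toList.length < 2) ∨ (_text.toList.all (fun c => _alphabet.toList.contains c)) = true)
instance (_alphabet : String) (_text : String) (a : Int) (b : Int) (crossing : Bool) : Decidable (Pre_affine_bigram_decrypt _alphabet _text a b crossing) := by unfold Pre_affine_bigram_decrypt; infer_instance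

def pvWitness_affine_bigram_decrypt : String × String × Int × Int × Bool := ("abcde", "abcd", 3, 1, false)

def Spec_affine_bigram_decrypt (_alphabet : String) (_text : String) (a : Int) (b : Int) (crossing : Bool) (out : String) : Prop := out = affine_bigram_decrypt_alt _alphabet _text a b crossing
instance (_alphabet : String) (_text : String) (a : Int) (b : Int) (crossing : Bool) (out : String) : Decidable (Spec_affine_bigram_decrypt _alphabet _text a b crossing out) := by unfold Spec_affine_bigram_decrypt; infer_instance

-- ===== CLAIM (what is proved, stated in full; the proofs are below) =====
def Claim_equal_affine_bigram_decrypt : Prop := ∀ (_alphabet : String) (_text : String) (a : Int) (b : Int) (crossing : Bool), Dom_affine_bigram_decrypt _alphabet _text a b crossing → Pre_affine_bigram_decrypt _alphabet _text a b crossing → Spec_affine_bigram_decrypt _alphabet _text a b crossing (affine_bigram_decrypt _alphabet _text a b crossing)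

-- ===== LEMMAS AND PROOFS =====

theorem get?_mem_values {α : Type} [BEq α] [LawfulBEq α] (d : PySem.Dict α Int) (c : α) (y : Int)
    (h : d.get? c = some y) : y ∈ d.values := by
  have := PySem.Dict.mem_items_of_get?_eq_some d h
  simp only [PySem.Dict.values]
  exact List.mem_map.mpr ⟨(c, y), this, rfl⟩
theorem get?_foldl_insert_values {α : Type} [BEq α] [LawfulBEq α]
    (l : List (Int × α)) (d : PySem.Dict α Int) (c : α) (y : Int)
    (h : ((l.foldl (fun d p => d.insert p.2 p.1) d).get? c) = some y) :
    y ∈ d.values ∨ ∃ p ∈ l, y = p.1 := by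
  induction l generalizing d with
  | nil => exact Or.inl (get?_mem_values _ _ _ h)
  | cons p rest ih =>
    rcases ih (d.insert p.2 p.1) h with hv | ⟨q, hq, hy⟩
    · rcases PySem.Dict.mem_values_insert d p.2 p.1 y hv with h1 | h2
      · exact Or.inr ⟨p, by simp, h1⟩
      · exact Or.inl h2
    · exact Or.inr ⟨q, by simp [hq], hy⟩
theorem mkIdx_bounds (al : List Char) (c : Char) (y : Int)
    (h : (mkIdx al).get? c = some y) : 0 ≤ y ∧ y < (al.length : Int) := by
  rcases get?_foldl_insert_values _ _ _ _ h with hv | ⟨p, hp, hy⟩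
  · simp [PySem.Dict.values, PySem.Dict.empty] at hv
  · rcases (PySem.List.mem_enumerate_iff al 0 p).mp hp with ⟨k, hk, rfl⟩
    simp at hy
    omega

theorem mkTable_get (al : List Char) (m a_inv b : Int) (Y : Int) (h0 : 0 ≤ Y) (hY : Y < m * m) :
    PySem.List.pyGet? (mkTable al m (m * m) a_inv b) Y
      = some (match PySem.List.pyGet? al (PySem.Int.floordiv (PySem.Int.mod (a_inv * PySem.Int.mod (Y - b) (m * m)) (m * m)) m),
                    PySem.List.pyGet? al (PySem.Int.mod (PySem.Int.mod (a_inv * PySem.Int.mod (Y - b) (m * m)) (m * m)) m) with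
              | some x1, some x2 => String.ofList [x1, x2]
              | _, _ => "") := by
  have hmm : m * m = (((m * m).toNat : Nat) : Int) := by omega
  have hlt : Y.toNat < (m * m).toNat := by omega
  unfold mkTable
  rw [PySem.List.pyGet?_of_nonneg _ h0]
  rw [hmm, PySem.List.getElem?_map_pyRange_zero _ _ _ hlt, Int.toNat_of_nonneg h0]

theorem decode_eq_lookup (al : List Char) (a_inv b : Int) (t : List Char) (i : Int) (c1 c2 : Char)
    (h1 : PySem.List.pyGet? t i = some c1) (h2 : PySem.List.pyGet? t (i + 1) = some c2) :
    decodeA al (al.length : Int) ((al.length : Int) * (al.length : Int)) a_inv b (mkIdx al) t i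
      = lookupB (mkTable al (al.length : Int) ((al.length : Int) * (al.length : Int)) a_inv b)
          (al.length : Int) (mkIdx al) (c1, c2) := by
  set m : Int := (al.length : Int) with hm
  unfold decodeA lookupB
  simp only [h1, h2]
  cases hy1 : (mkIdx al).get? c1 with
  | none => simp
  | some y1 =>
  cases hy2 : (mkIdx al).get? c2 with
  | none => simp
  | some y2 =>
  simp only
  obtain ⟨hy1l, hy1u⟩ := mkIdx_bounds al c1 y1 hy1
  obtain ⟨hy2l, hy2u⟩ := mkIdx_bounds al c2 y2 hy2
  have hm1 : (1:Int) ≤ m := by omega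
  have hY0 : 0 ≤ y1 * m + y2 := by nlinarith
  have hYlt : y1 * m + y2 < m * m := by nlinarith
  have hnm : (0:Int) < m * m := by nlinarith
  rw [mkTable_get al m a_inv b _ hY0 hYlt]
  set X := PySem.Int.mod (a_inv * PySem.Int.mod (y1 * m + y2 - b) (m * m)) (m * m) with hX
  have hX0 : 0 ≤ X := PySem.Int.mod_nonneg _ hnm
  have hXlt : X < m * m := PySem.Int.mod_lt _ hnm
  have hx1l : 0 ≤ PySem.Int.floordiv X m := by
    rw [PySem.Int.le_floordiv_iff_mul_le (by omega)]; linarith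
  have hx1u : PySem.Int.floordiv X m < m := by
    rw [PySem.Int.floordiv_lt_iff_lt_mul (by omega)]; linarith
  have hx2l : 0 ≤ PySem.Int.mod X m := PySem.Int.mod_nonneg _ (by omega)
  have hx2u : PySem.Int.mod X m < m := PySem.Int.mod_lt _ (by omega)
  rw [PySem.List.pyGet?_eq_some_getElem al hx1l (by omega),
      PySem.List.pyGet?_eq_some_getElem al hx2l (by omega)]

theorem loop_eq (al : List Char) (a_inv b : Int) (t : List Char)
    (idxs : List Int) (pairs : List (Char × Char))
    (h : List.Forall₂ (fun i p => PySem.List.pyGet? t i = some p.1 ∧ PySem.List.pyGet? t (i + 1) = some p.2) idxs pairs) :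
    loopA al (al.length : Int) ((al.length : Int) * (al.length : Int)) a_inv b (mkIdx al) t idxs
      = loopB (mkTable al (al.length : Int) ((al.length : Int) * (al.length : Int)) a_inv b)
          (al.length : Int) (mkIdx al) pairs := by
  induction h with
  | nil => rfl
  | @cons i p idxs' pairs' hp _ ih =>
    unfold loopA loopB
    rw [decode_eq_lookup al a_inv b t i p.1 p.2 hp.1 hp.2, ih]

theorem forall₂_cross (t : List Char) :
    List.Forall₂ (fun i p => PySem.List.pyGet? t i = some p.1 ∧ PySem.List.pyGet? t (i + 1) = some p.2)
      (PySem.List.pyRange 0 ((t.length : Int) - 1) 1)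
      (t.zip (PySem.List.slice t (some 1) none)) := by
  rw [PySem.List.slice_from_one, PySem.List.pyRange_one]
  rw [List.forall₂_iff_get]
  constructor
  · simp
  · intro k h1 h2
    simp only [List.get_eq_getElem, List.getElem_map, List.getElem_range, List.getElem_zip]
    have hk : k + 1 < t.length := by
      simp at h2; omega
    constructor
    · have : (0 : Int) + (k : Int) = ((k : Nat) : Int) := by omega
      rw [this, PySem.List.pyGet?_natCast]
      simp [List.getElem?_eq_getElem (by omega : k < t.length)]
    · have : (0 : Int) + (k : Int) + 1 = (((k+1) : Nat) : Int) := by push_cast; omega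
      rw [this, PySem.List.pyGet?_natCast]
      simp [List.getElem?_eq_getElem hk, List.getElem_tail]
theorem slice?_two_zero (t : List Char) :
    PySem.List.slice? t none none 2
      = some ((List.range (((t.length : Int) + 1) / 2).toNat).filterMap (fun k => t[2 * k]?)) := by
  unfold PySem.List.slice? PySem.List.sliceIndices
  norm_num
  have hif : (if 0 < t.length then (((t.length : Int) + 2 - 1) / 2).toNat else 0) = (((t.length : Int) + 1) / 2).toNat := by
    split <;> omega
  rw [hif]
  apply List.filterMap_congr
  intro k _
  congr 1


theorem slice?_two_one (t : List Char) (h : t.length % 2 = 0) :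
    PySem.List.slice? t (some 1) none 2
      = some ((List.range (t.length / 2)).filterMap (fun k => t[2 * k + 1]?)) := by
  unfold PySem.List.slice? PySem.List.sliceIndices
  norm_num
  rcases Nat.eq_zero_or_pos t.length with h0 | hpos
  · simp [h0]
  · have hmin : min (1:Int) (t.length:Int) = 1 := by omega
    rw [hmin, if_pos (by omega : 1 < t.length)]
    have hc : (((t.length : Int) - 1 + 2 - 1) / 2).toNat = t.length / 2 := by omega
    rw [hc]
    apply List.filterMap_congr
    intro k _
    congr 1
    omega

theorem filterMap_getElem_eq_map (t : List Char) (c : Nat) (f : Nat → Nat) (hf : ∀ k < c, f k < t.length) :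
    (List.range c).filterMap (fun k => t[f k]?) = (List.range c).map (fun k => t.getD (f k) default) := by
  rw [List.filterMap_congr (g := fun k => some (t.getD (f k) default))
      (by intro k hk; simp at hk
          rw [List.getElem?_eq_getElem (hf k hk)]
          simp only []
          rw [List.getD_eq_getElem t default (hf k hk)])]
  simp

theorem forall₂_noncross (t : List Char) (h : t.length % 2 = 0) :
    List.Forall₂ (fun i p => PySem.List.pyGet? t i = some p.1 ∧ PySem.List.pyGet? t (i + 1) = some p.2)
      (PySem.List.pyRange 0 (t.length : Int) 2)
      (((PySem.List.slice? t none none 2).getD []).zip ((PySem.List.slice? t (some 1) none 2).getD [])) := by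
  rw [slice?_two_zero, slice?_two_one t h]
  simp only [Option.getD_some]
  have hc0 : (((t.length : Int) + 1) / 2).toNat = t.length / 2 := by omega
  rw [hc0]
  rw [filterMap_getElem_eq_map t _ _ (by intro k hk; omega),
      filterMap_getElem_eq_map t _ _ (by intro k hk; omega)]
  rw [List.zip_map']
  rw [PySem.List.pyRange_of_pos 0 (t.length : Int) (by norm_num)]
  have hc1 : (if (0:Int) < (t.length : Int) then (((t.length : Int) - 0 + 2 - 1) / 2).toNat else 0) = t.length / 2 := by
    split <;> omega
  rw [hc1]
  rw [List.forall₂_map_left_iff, List.forall₂_map_right_iff]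
  apply List.forall₂_same.mpr
  intro k hk
  simp at hk
  constructor
  · have : (0 : Int) + 2 * (k : Int) = ((2 * k : Nat) : Int) := by push_cast; ring
    rw [this, PySem.List.pyGet?_natCast, List.getElem?_eq_getElem (by omega),
        List.getD_eq_getElem t default (by omega : 2 * k < t.length)]
  · have : (0 : Int) + 2 * (k : Int) + 1 = ((2 * k + 1 : Nat) : Int) := by push_cast; ring
    rw [this, PySem.List.pyGet?_natCast, List.getElem?_eq_getElem (by omega),
        List.getD_eq_getElem t default (by omega : 2 * k + 1 < t.length)]

theorem general_eq (_alphabet : String) (_text : String) (a : Int) (b : Int) (crossing : Bool) :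
    affine_bigram_decrypt _alphabet _text a b crossing = affine_bigram_decrypt_alt _alphabet _text a b crossing := by
  unfold affine_bigram_decrypt affine_bigram_decrypt_alt
  simp only
  by_cases hg : (pyEuclid a ((_alphabet.toList.length : Int) * (_alphabet.toList.length : Int))).1 = 1
  · rw [if_neg (not_not_intro hg), if_neg (not_not_intro hg)]
    congr 1
    by_cases hcr : crossing = false
    · rw [if_pos hcr, if_pos hcr]
      by_cases hodd : PySem.Int.mod (_text.toList.length : Int) 2 ≠ 0
      · rw [if_pos hodd, if_pos hodd]
      · rw [if_neg hodd, if_neg hodd]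
        apply loop_eq
        apply forall₂_noncross
        simp only [not_not] at hodd
        have h2 := PySem.Int.mod_natCast (_text.toList.length) 2
        push_cast at h2
        omega
    · rw [if_neg hcr, if_neg hcr]
      by_cases hlen : _text.toList.length < 2
      · rw [if_pos hlen, if_pos hlen]
      · rw [if_neg hlen, if_neg hlen]
        exact loop_eq _ _ _ _ _ _ (forall₂_cross _text.toList)
  · rw [if_pos hg, if_pos hg]

-- ===== VERDICT (by name: the statement is the Claim_ definition above) =====
theorem affine_bigram_decrypt_spec : Claim_equal_affine_bigram_decrypt := by
  intro _alphabet _text a b crossing _ _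
  unfold Spec_affine_bigram_decrypt
  exact general_eq _alphabet _text a b crossing
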